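-- pv_equiv track=rewrite | github.com/simhal/chat_bot | backend/agents/main_chat_agent.py | _is_entitlement_query
-- ===== SOURCE A (Python) =====
-- def _is_entitlement_query(message: str) -> bool:
--     """
--     Check if the user is asking about their entitlements/permissions.
--
--     Args:
--         message: User message
--
--     Returns:
--         True if asking about entitlements
--     """
--     entitlement_keywords = [
--         "permission", "entitlement", "access", "role", "what can i do",
--         "my role", "my access", "my permission", "what am i allowed",
--         "can i access", "what features", "my capabilities", "what's available",
--         "am i allowed", "do i have access", "what topics", "my entitlements"
--     ]
--     message_lower = message.lower()
--     return any(keyword in message_lower for keyword in entitlement_keywords)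
-- ===== SOURCE B (Python) =====
-- def _is_entitlement_query(message: str) -> bool:
--     """
--     Check if the user is asking about their entitlements/permissions.
--     Single left-to-right scan: at each position, test whether some keyword
--     starts there (position-major instead of keyword-major traversal).
--     """
--     entitlement_keywords = [
--         "permission", "entitlement", "access", "role", "what can i do",
--         "my role", "my access", "my permission", "what am i allowed",
--         "can i access", "what features", "my capabilities", "what's available",
--         "am i allowed", "do i have access", "what topics", "my entitlements"
--     ]
--     ml = message.lower()
--     for i in range(len(ml) + 1):
--         for keyword in entitlement_keywords:
--             if ml.startswith(keyword, i):
--                 return True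
--     return False
-- ===== Notes on version B (the rewrite author's own statement) =====
-- stated objective: alternative
-- what changed: A iterates over keywords, letting each keyword scan the whole lowered message; B makes one position-major left-to-right scan of the lowered message, testing at each index whether some keyword starts there.
import Mathlib
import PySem

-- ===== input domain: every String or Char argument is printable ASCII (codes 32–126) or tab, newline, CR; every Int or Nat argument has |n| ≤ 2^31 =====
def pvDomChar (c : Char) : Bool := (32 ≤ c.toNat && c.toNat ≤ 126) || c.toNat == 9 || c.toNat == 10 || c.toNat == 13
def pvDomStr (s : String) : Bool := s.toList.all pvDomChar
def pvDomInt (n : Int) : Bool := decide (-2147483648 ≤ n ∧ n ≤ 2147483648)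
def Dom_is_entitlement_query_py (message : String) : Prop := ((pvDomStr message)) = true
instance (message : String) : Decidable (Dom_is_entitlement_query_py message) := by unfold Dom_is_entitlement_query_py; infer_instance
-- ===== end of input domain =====

-- B replaces the keyword-major substring loop by one position-major scan of the lowered message (objective: alternative).


def pvKeywords : List String :=
  ["permission", "entitlement", "access", "role", "what can i do",
   "my role", "my access", "my permission", "what am i allowed",
   "can i access", "what features", "my capabilities", "what's available",
   "am i allowed", "do i have access", "what topics", "my entitlements"]

-- ===== PORT A =====
-- any(keyword in message_lower for keyword in entitlement_keywords)
def is_entitlement_query_py (message : String) : Bool :=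
  let message_lower := PySem.Str.lower message
  pvKeywords.any (fun keyword => PySem.Str.isIn keyword message_lower)

-- ===== PORT B =====
-- for i in range(len(ml)+1): for keyword in keywords: if ml.startswith(keyword, i): return True
def is_entitlement_query_py_alt (message : String) : Bool :=
  let ml := (PySem.Str.lower message).toList
  (List.range (ml.length + 1)).any (fun i =>
    pvKeywords.any (fun keyword => PySem.Chars.startswith (ml.drop i) keyword.toList))

-- ===== PRECONDITION & SPEC =====
def Spec_is_entitlement_query_py (message : String) (out : Bool) : Prop := out = is_entitlement_query_py_alt message
instance (message : String) (out : Bool) : Decidable (Spec_is_entitlement_query_py message out) := by unfold Spec_is_entitlement_query_py; infer_instance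

-- ===== CLAIM (what is proved, stated in full; the proofs are below) =====
def Claim_equal_is_entitlement_query_py : Prop := ∀ (message : String), Dom_is_entitlement_query_py message → Spec_is_entitlement_query_py message (is_entitlement_query_py message)

-- ===== LEMMAS AND PROOFS =====
theorem pv_isIn_iff_exists_range (sub : String) (s : List Char) :
    PySem.Chars.isIn sub.toList s = true ↔
    ∃ i ∈ List.range (s.length + 1), PySem.Chars.startswith (s.drop i) sub.toList = true := by
  rw [← PySem.Chars.exists_prefix_drop_iff_isIn]
  constructor
  · rintro ⟨j, hj⟩
    refine ⟨min j s.length, ?_, ?_⟩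
    · simp only [List.mem_range]; omega
    · rw [PySem.Chars.startswith_iff]
      rcases le_or_gt j s.length with h | h
      · simpa [min_eq_left h] using hj
      · have : s.drop j = [] := List.drop_eq_nil_of_le (le_of_lt h)
        have hnil : sub.toList = [] := List.prefix_nil.mp (this ▸ hj)
        simp [hnil]
  · rintro ⟨i, _, hi⟩
    exact ⟨i, (PySem.Chars.startswith_iff _ _).mp hi⟩

-- ===== VERDICT (by name: the statement is the Claim_ definition above) =====
theorem is_entitlement_query_py_spec : Claim_equal_is_entitlement_query_py := by
  intro message _
  unfold Spec_is_entitlement_query_py is_entitlement_query_py is_entitlement_query_py_alt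
  simp only [PySem.Str.isIn_eq]
  rw [Bool.eq_iff_iff]
  simp only [List.any_eq_true]
  constructor
  · rintro ⟨k, hk, hin⟩
    obtain ⟨i, hi, hs⟩ := (pv_isIn_iff_exists_range k _).mp hin
    exact ⟨i, hi, k, hk, hs⟩
  · rintro ⟨i, hi, k, hk, hs⟩
    exact ⟨k, hk, (pv_isIn_iff_exists_range k _).mpr ⟨i, hi, hs⟩⟩
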